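-- pv_equiv track=rewrite | github.com/JUNJOONHWAN/quant | stock_bench_referonly/regime_backtest/simulator.py | _idx_range
-- ===== SOURCE A (Python) =====
-- from typing import Any, Dict, List, Optional, Tuple
--
-- def _idx_range(dates: List[str], start_val: Optional[str], end_val: Optional[str]) -> Tuple[int, int]:
--     if not dates:
--         return (0, -1)
--     start_idx = 0
--     end_idx = len(dates) - 1
--     if start_val:
--         for idx, day in enumerate(dates):
--             if day >= start_val:
--                 start_idx = idx
--                 break
--     if end_val:
--         for idx in range(len(dates) - 1, -1, -1):
--             if dates[idx] <= end_val:
--                 end_idx = idx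
--                 break
--     return (max(0, start_idx), max(start_idx, end_idx))
-- ===== SOURCE B (Python) =====
-- def _idx_range(dates, start_val, end_val):
--     # One forward pass tracking both endpoints at once (no backward scan, no breaks).
--     if not dates:
--         return (0, -1)
--     first_ge = None
--     last_le = None
--     for i, d in enumerate(dates):
--         if start_val and first_ge is None and d >= start_val:
--             first_ge = i
--         if end_val and d <= end_val:
--             last_le = i
--     s = first_ge if first_ge is not None else 0
--     e = last_le if last_le is not None else len(dates) - 1
--     return (s, max(s, e))
-- ===== Notes on version B (the rewrite author's own statement) =====
-- stated objective: alternative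
-- what changed: Replaces A's two separate break-on-first-match scans (one forward over enumerate, one backward over an index range) by a single forward pass that maintains the first index >= start_val and the last index <= end_val simultaneously as Option values, applying defaults at the end.
import Mathlib
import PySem

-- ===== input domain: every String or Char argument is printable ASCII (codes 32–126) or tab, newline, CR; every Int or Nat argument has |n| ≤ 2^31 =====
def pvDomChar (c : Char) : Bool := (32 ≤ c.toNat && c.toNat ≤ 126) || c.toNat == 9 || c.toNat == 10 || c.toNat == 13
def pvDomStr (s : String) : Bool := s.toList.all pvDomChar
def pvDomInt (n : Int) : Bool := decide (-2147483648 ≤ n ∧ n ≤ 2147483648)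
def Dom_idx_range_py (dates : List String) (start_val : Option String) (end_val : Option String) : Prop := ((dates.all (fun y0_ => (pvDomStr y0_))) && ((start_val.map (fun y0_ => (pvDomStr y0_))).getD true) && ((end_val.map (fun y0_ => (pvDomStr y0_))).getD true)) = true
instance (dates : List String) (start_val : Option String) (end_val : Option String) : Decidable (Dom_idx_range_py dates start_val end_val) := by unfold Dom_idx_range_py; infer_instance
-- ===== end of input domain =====

-- B: one forward pass maintaining both endpoints at once instead of A's two break-on-match scans; alternative decomposition, same return value on every input.


-- Python truthiness of an Optional[str]: None and "" are falsy.
def pyTruthyStr (o : Option String) : Bool :=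
  match o with
  | none => false
  | some s => !(s == "")

-- ===== PORT A =====
-- 'for idx, day in enumerate(dates): if day >= start_val: start_idx = idx; break'
def aFirstLoop (sv : String) : List String → Int → Option Int
  | [], _ => none
  | d :: rest, idx => if sv ≤ d then some idx else aFirstLoop sv rest (idx + 1)

-- 'for idx in range(len(dates)-1, -1, -1): if dates[idx] <= end_val: end_idx = idx; break'
-- dates[idx] is ported as pyGetD with default "": every idx the range produces is in range.
def aLastLoop (dates : List String) (ev : String) : List Int → Option Int
  | [] => none
  | i :: rest => if PySem.List.pyGetD dates i "" ≤ ev then some i else aLastLoop dates ev rest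

def idx_range_py (dates : List String) (start_val : Option String) (end_val : Option String) : Int × Int :=
  if dates = [] then (0, -1)
  else
    let start_idx : Int := 0
    let end_idx : Int := (dates.length : Int) - 1
    let start_idx := if pyTruthyStr start_val then (aFirstLoop (start_val.getD "") dates 0).getD start_idx else start_idx
    let end_idx := if pyTruthyStr end_val then (aLastLoop dates (end_val.getD "") (PySem.List.pyRange ((dates.length : Int) - 1) (-1) (-1))).getD end_idx else end_idx
    (max 0 start_idx, max start_idx end_idx)

-- ===== PORT B =====
-- single forward pass over enumerate(dates), carrying (first_ge, last_le)
def bLoop (sv ev : Option String) : List String → Int → Option Int × Option Int → Option Int × Option Int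
  | [], _, acc => acc
  | d :: rest, i, (fg, ll) =>
      let fg := if pyTruthyStr sv && fg.isNone && (sv.getD "" ≤ d) then some i else fg
      let ll := if pyTruthyStr ev && (d ≤ ev.getD "") then some i else ll
      bLoop sv ev rest (i + 1) (fg, ll)

def idx_range_py_alt (dates : List String) (start_val : Option String) (end_val : Option String) : Int × Int :=
  if dates = [] then (0, -1)
  else
    let p := bLoop start_val end_val dates 0 (none, none)
    let s := p.1.getD 0
    let e := p.2.getD ((dates.length : Int) - 1)
    (s, max s e)

-- ===== PRECONDITION & SPEC =====
def Spec_idx_range_py (dates : List String) (start_val : Option String) (end_val : Option String) (out : Int × Int) : Prop := out = idx_range_py_alt dates start_val end_val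
instance (dates : List String) (start_val : Option String) (end_val : Option String) (out : Int × Int) : Decidable (Spec_idx_range_py dates start_val end_val out) := by unfold Spec_idx_range_py; infer_instance

-- ===== CLAIM (what is proved, stated in full; the proofs are below) =====
def Claim_equal_idx_range_py : Prop := ∀ (dates : List String) (start_val : Option String) (end_val : Option String), Dom_idx_range_py dates start_val end_val → Spec_idx_range_py dates start_val end_val (idx_range_py dates start_val end_val)

-- ===== LEMMAS AND PROOFS =====

-- proof-side characterisation of "last index i ≥ base with dates[i-base] ≤ ev"
def lastLe (ev : String) : List String → Int → Option Int
  | [], _ => none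
  | d :: rest, i => (lastLe ev rest (i + 1)).or (if d ≤ ev then some i else none)

theorem bLoop_fst (sv ev : Option String) (l : List String) (i : Int) (fg ll : Option Int) :
    (bLoop sv ev l i (fg, ll)).1 =
      if pyTruthyStr sv then fg.or (aFirstLoop (sv.getD "") l i) else fg := by
  induction l generalizing i fg ll with
  | nil => simp [bLoop, aFirstLoop]
  | cons d rest ih =>
    simp only [bLoop, aFirstLoop]
    rw [ih]
    by_cases hsv : pyTruthyStr sv = true
    · simp only [hsv, if_true, Bool.true_and]
      cases fg with
      | some x => simp
      | none =>
        by_cases hle : sv.getD "" ≤ d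
        · simp [hle]
        · simp [hle]
    · simp [hsv]

theorem bLoop_snd (sv ev : Option String) (l : List String) (i : Int) (fg ll : Option Int) :
    (bLoop sv ev l i (fg, ll)).2 =
      if pyTruthyStr ev then (lastLe (ev.getD "") l i).or ll else ll := by
  induction l generalizing i fg ll with
  | nil => simp [bLoop, lastLe]
  | cons d rest ih =>
    simp only [bLoop, lastLe]
    rw [ih]
    by_cases hev : pyTruthyStr ev = true
    · simp only [hev, if_true, Bool.true_and, Option.or_assoc]
      by_cases hle : d ≤ ev.getD ""
      · simp [hle]
      · simp [hle]
    · simp [hev]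

theorem lastLe_append (ev : String) (t : List String) (d : String) (i : Int) :
    lastLe ev (t ++ [d]) i =
      (if d ≤ ev then some (i + (t.length : Int)) else none).or (lastLe ev t i) := by
  induction t generalizing i with
  | nil => simp [lastLe]
  | cons x t ih =>
    simp only [List.cons_append, lastLe]
    rw [ih]
    have : i + 1 + (t.length : Int) = i + ((t.length : Int) + 1) := by ring
    simp [this, Option.or_assoc]

theorem aLastLoop_congr_append (l : List String) (d : String) (ev : String) :
    ∀ idxs : List Int, (∀ i ∈ idxs, 0 ≤ i ∧ i < (l.length : Int)) →
      aLastLoop (l ++ [d]) ev idxs = aLastLoop l ev idxs := by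
  intro idxs h
  induction idxs with
  | nil => rfl
  | cons i rest ih =>
    have hi := h i (by simp)
    have hget : PySem.List.pyGetD (l ++ [d]) i "" = PySem.List.pyGetD l i "" := by
      rw [PySem.List.pyGetD_eq_getElem (l ++ [d]) "" hi.1 (by simp; omega),
          PySem.List.pyGetD_eq_getElem l "" hi.1 hi.2]
      have ht : i.toNat < l.length := by omega
      simp [ht]
    simp only [aLastLoop, hget]
    rw [ih (fun j hj => h j (by simp [hj]))]

theorem aLast_bridge (ev : String) (l : List String) :
    aLastLoop l ev (PySem.List.pyRange ((l.length : Int) - 1) (-1) (-1)) = lastLe ev l 0 := by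
  induction l using List.reverseRecOn with
  | nil =>
    rw [PySem.List.pyRange_neg_one_eq_nil (by simp)]
    rfl
  | append_singleton t d ih =>
    have hlen : (((t ++ [d]).length : Int) - 1) = (t.length : Int) := by simp
    rw [hlen, PySem.List.pyRange_neg_one_cons (by omega)]
    have hget : PySem.List.pyGetD (t ++ [d]) (t.length : Int) "" = d := by
      rw [PySem.List.pyGetD_eq_getElem (t ++ [d]) "" (by omega) (by simp)]
      simp
    simp only [aLastLoop, hget, lastLe_append]
    by_cases hle : d ≤ ev
    · simp [hle]
    · simp only [hle, if_false, Option.none_or]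
      rw [aLastLoop_congr_append t d ev _ (by
        intro i hi
        rw [PySem.List.mem_pyRange_neg_one] at hi
        omega)]
      exact ih

theorem aFirstLoop_nonneg (sv : String) (l : List String) (i j : Int) (h : 0 ≤ i)
    (hj : aFirstLoop sv l i = some j) : 0 ≤ j := by
  induction l generalizing i with
  | nil => simp [aFirstLoop] at hj
  | cons d rest ih =>
    simp only [aFirstLoop] at hj
    split at hj
    · injection hj with hji; omega
    · exact ih (i + 1) (by omega) hj

-- ===== VERDICT (by name: the statement is the Claim_ definition above) =====
theorem idx_range_py_spec : Claim_equal_idx_range_py := by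
  intro dates start_val end_val _
  unfold Spec_idx_range_py idx_range_py idx_range_py_alt
  by_cases hnil : dates = []
  · simp [hnil]
  · simp only [hnil, if_false]
    rw [bLoop_fst, bLoop_snd]
    -- the two start components agree, and the B one is nonnegative
    have hs : (if pyTruthyStr start_val then
          ((Option.none.or (aFirstLoop (start_val.getD "") dates 0)).getD 0)
        else ((Option.none : Option Int).getD 0)) =
        (if pyTruthyStr start_val then (aFirstLoop (start_val.getD "") dates 0).getD 0 else 0) := by
      simp
    have hsnn : 0 ≤ (if pyTruthyStr start_val then (aFirstLoop (start_val.getD "") dates 0).getD 0 else 0) := by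
      split
      · cases h : aFirstLoop (start_val.getD "") dates 0 with
        | none => simp
        | some j => simpa using aFirstLoop_nonneg _ _ _ _ (le_refl 0) h
      · omega
    have he : (if pyTruthyStr end_val then
          (((lastLe (end_val.getD "") dates 0).or Option.none).getD ((dates.length : Int) - 1))
        else ((Option.none : Option Int).getD ((dates.length : Int) - 1))) =
        (if pyTruthyStr end_val then
          ((aLastLoop dates (end_val.getD "") (PySem.List.pyRange ((dates.length : Int) - 1) (-1) (-1))).getD ((dates.length : Int) - 1))
        else ((dates.length : Int) - 1)) := by
      rw [aLast_bridge]
      simp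
    by_cases h1 : pyTruthyStr start_val <;> by_cases h2 : pyTruthyStr end_val <;>
      simp only [h1, h2, if_true] at hs hsnn he ⊢ <;>
      simp_all [aLast_bridge]
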